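-- pv_equiv track=rewrite | github.com/chiawen81/Cinpos_model | src/ML_boxoffice/common/feature_engineering.py | calculate_gap_features
-- ===== SOURCE A (Python) =====
-- from typing import Dict, List, Optional, Tuple
--
-- def calculate_gap_features(
--     week_data: List[Dict],
--     target_week: int
-- ) -> Dict[str, int]:
--     """
--     計算跳週數（基於活躍週次）
--
--     Args:
--         week_data: 週次資料列表
--         target_week: 目標週次
--
--     Returns:
--         包含跳週數的字典：
--         - gap_real_week_2to1: 前2週到前1週之間跳過的週數
--         - gap_real_week_1tocurrent: 前1週到當前週之間跳過的週數
--     """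
--     # 排序並只保留有票房的週次
--     active_weeks = sorted(
--         [w for w in week_data if w.get('boxoffice', 0) > 0],
--         key=lambda x: x.get('week', 0)
--     )
--
--     # 預設值
--     gap_2to1 = 0
--     gap_1tocurrent = 0
--
--     # 找出前1週和前2週（活躍週次）
--     if len(active_weeks) >= 1:
--         week_1 = active_weeks[-1].get('week', 0)
--         gap_1tocurrent = target_week - week_1 - 1
--
--     if len(active_weeks) >= 2:
--         week_1 = active_weeks[-1].get('week', 0)
--         week_2 = active_weeks[-2].get('week', 0)
--         gap_2to1 = week_1 - week_2 - 1
--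
--     return {
--         'gap_real_week_2to1': max(0, gap_2to1),
--         'gap_real_week_1tocurrent': max(0, gap_1tocurrent),
--     }
-- ===== SOURCE B (Python) =====
-- def calculate_gap_features(week_data, target_week):
--     # No sorting: just collect the week numbers of active weeks and take
--     # the largest and second-largest by scanning.
--     weeks = [w.get('week', 0) for w in week_data if w.get('boxoffice', 0) > 0]
--
--     gap_2to1 = 0
--     gap_1tocurrent = 0
--
--     if weeks:
--         week_1 = max(weeks)
--         gap_1tocurrent = target_week - week_1 - 1
--         if len(weeks) >= 2:
--             rest = list(weeks)
--             rest.remove(week_1)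
--             gap_2to1 = week_1 - max(rest) - 1
--
--     return {
--         'gap_real_week_2to1': max(0, gap_2to1),
--         'gap_real_week_1tocurrent': max(0, gap_1tocurrent),
--     }
-- ===== Notes on version B (the rewrite author's own statement) =====
-- stated objective: simpler
-- what changed: Replaces the sort of the active-week records with a plain max scan over the week values (second largest found by removing one occurrence of the max), avoiding the O(n log n) sort and the negative indexing.
import Mathlib
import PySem

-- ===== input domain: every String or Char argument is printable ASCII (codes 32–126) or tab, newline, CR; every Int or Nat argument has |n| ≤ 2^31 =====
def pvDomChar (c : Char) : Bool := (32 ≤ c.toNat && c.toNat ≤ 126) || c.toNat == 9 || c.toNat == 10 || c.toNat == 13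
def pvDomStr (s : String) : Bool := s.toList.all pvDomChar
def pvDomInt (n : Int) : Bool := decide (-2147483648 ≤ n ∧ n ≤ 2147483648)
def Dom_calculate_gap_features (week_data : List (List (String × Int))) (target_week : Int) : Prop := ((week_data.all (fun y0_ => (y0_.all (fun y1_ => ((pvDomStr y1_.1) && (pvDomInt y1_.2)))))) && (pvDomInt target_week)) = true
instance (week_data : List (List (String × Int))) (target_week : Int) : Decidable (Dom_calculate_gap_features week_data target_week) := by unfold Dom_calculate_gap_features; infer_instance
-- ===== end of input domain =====

-- w.get(k, d) on a Python dict rendered as an association list: first match or default.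
-- (Shared by both ports: both Pythons call dict.get the same way.)
def dget (w : List (String × Int)) (k : String) (d : Int) : Int :=
  match w.find? (fun p => p.1 == k) with
  | some p => p.2
  | none => d

-- ===== PORT A =====
-- sort the active weeks by their 'week' value, then read the last and second-last
def calculate_gap_features (week_data : List (List (String × Int))) (target_week : Int) : List (String × Int) :=
  let active_weeks := PySem.List.sorted
    (week_data.filter (fun w => decide (dget w "boxoffice" 0 > 0)))
    (fun x => dget x "week" 0)
  let gap_1tocurrent : Int :=
    if 1 ≤ active_weeks.length then
      target_week - dget (PySem.List.pyGetD active_weeks (-1) []) "week" 0 - 1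
    else 0
  let gap_2to1 : Int :=
    if 2 ≤ active_weeks.length then
      dget (PySem.List.pyGetD active_weeks (-1) []) "week" 0
        - dget (PySem.List.pyGetD active_weeks (-2) []) "week" 0 - 1
    else 0
  [("gap_real_week_2to1", max 0 gap_2to1),
   ("gap_real_week_1tocurrent", max 0 gap_1tocurrent)]

-- ===== PORT B =====
-- no sort: collect the active week values, take max, and max of the rest
def calculate_gap_features_alt (week_data : List (List (String × Int))) (target_week : Int) : List (String × Int) :=
  let weeks := (week_data.filter (fun w => decide (dget w "boxoffice" 0 > 0))).map
    (fun w => dget w "week" 0)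
  let gaps : Int × Int :=  -- (gap_2to1, gap_1tocurrent)
    match PySem.List.max? weeks (fun x => x) with
    | none => (0, 0)
    | some week_1 =>
      let gap_1tocurrent := target_week - week_1 - 1
      let gap_2to1 : Int :=
        if 2 ≤ weeks.length then
          match PySem.List.remove? weeks week_1 with
          | some rest =>
            match PySem.List.max? rest (fun x => x) with
            | some week_2 => week_1 - week_2 - 1
            | none => 0  -- unreachable: rest nonempty when len ≥ 2
          | none => 0    -- unreachable: week_1 ∈ weeks
        else 0
      (gap_2to1, gap_1tocurrent)
  [("gap_real_week_2to1", max 0 gaps.1),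
   ("gap_real_week_1tocurrent", max 0 gaps.2)]

-- ===== PRECONDITION & SPEC =====
def Spec_calculate_gap_features (week_data : List (List (String × Int))) (target_week : Int) (out : List (String × Int)) : Prop := out = calculate_gap_features_alt week_data target_week
instance (week_data : List (List (String × Int))) (target_week : Int) (out : List (String × Int)) : Decidable (Spec_calculate_gap_features week_data target_week out) := by unfold Spec_calculate_gap_features; infer_instance

-- ===== CLAIM (what is proved, stated in full; the proofs are below) =====
def Claim_equal_calculate_gap_features : Prop := ∀ (week_data : List (List (String × Int))) (target_week : Int), Dom_calculate_gap_features week_data target_week → Spec_calculate_gap_features week_data target_week (calculate_gap_features week_data target_week)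

-- ===== LEMMAS AND PROOFS =====

-- In a nonempty ≤-sorted list, the last element bounds every element.
theorem le_getLast_of_pairwise {m : List Int} (hp : m.Pairwise (· ≤ ·)) (h : m ≠ [])
    {y : Int} (hy : y ∈ m) : y ≤ m.getLast h := by
  induction m with
  | nil => cases hy
  | cons a t ih =>
    rcases List.mem_cons.mp hy with rfl | hyt
    · cases t with
      | nil => simp
      | cons b u =>
        have hab : y ≤ (b :: u).getLast (by simp) := by
          have := (List.pairwise_cons.mp hp).1
          exact this _ (List.getLast_mem _)
        simpa [List.getLast] using hab
    · cases t with
      | nil => cases hyt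
      | cons b u =>
        have := ih (List.pairwise_cons.mp hp).2 (by simp) hyt
        simpa [List.getLast] using this

-- Python max(ks) equals the last element of any ≤-sorted rearrangement of ks.
theorem max?_eq_getLast_of_perm {m ks : List Int} (hperm : m.Perm ks)
    (hp : m.Pairwise (· ≤ ·)) (h : m ≠ []) :
    PySem.List.max? ks (fun x => x) = some (m.getLast h) := by
  have hks : ks ≠ [] := by
    intro hnil; exact h (List.Perm.eq_nil (hnil ▸ hperm))
  obtain ⟨v, hv⟩ : ∃ v, PySem.List.max? ks (fun x => x) = some v := by
    cases hmx : PySem.List.max? ks (fun x => x) with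
    | none => exact absurd ((PySem.List.max?_eq_none_iff ks (fun x => x)).mp hmx) hks
    | some v => exact ⟨v, rfl⟩
  have hvmem : v ∈ ks := PySem.List.max?_mem hv
  have hvmax : ∀ y ∈ ks, y ≤ v := PySem.List.max?_isMax hv
  have h1 : v ≤ m.getLast h :=
    le_getLast_of_pairwise hp h (hperm.mem_iff.mpr hvmem)
  have h2 : m.getLast h ≤ v := hvmax _ (hperm.subset (List.getLast_mem h))
  rw [hv]; exact congrArg some (le_antisymm h1 h2)

-- Erasing one occurrence of the last element is a permutation of dropping the last element.
theorem erase_getLast_perm_dropLast (m : List Int) (h : m ≠ []) :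
    (m.erase (m.getLast h)).Perm m.dropLast := by
  obtain ⟨d, a, rfl⟩ : ∃ d a, m = d ++ [a] := by
    obtain ⟨d, a, hda⟩ := List.eq_nil_or_concat m |>.resolve_left h
    exact ⟨d, a, by simpa [List.concat_eq_append] using hda⟩
  have hlast : (d ++ [a]).getLast h = a := by simp
  rw [hlast, List.dropLast_concat]
  by_cases hmem : a ∈ d
  · rw [List.erase_append_left _ hmem]
    exact (List.perm_append_singleton a _).trans (List.perm_cons_erase hmem).symm
  · rw [List.erase_append_right _ hmem]
    simp

-- With at least one active record: B's max over the key values is the key of A's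
-- last sorted record.
theorem last_week {α : Type} (l : List α) (key : α → Int)
    (hsne : PySem.List.sorted l key ≠ []) :
    PySem.List.max? (l.map key) (fun x => x)
      = some (key ((PySem.List.sorted l key).getLast hsne)) := by
  have hperm : ((PySem.List.sorted l key).map key).Perm (l.map key) :=
    (PySem.List.sorted_perm l key false).map _
  have hpair := PySem.List.sorted_map_key_pairwise l key
  have hmne : (PySem.List.sorted l key).map key ≠ [] := by simpa using hsne
  rw [max?_eq_getLast_of_perm hperm hpair hmne]
  exact congrArg some (List.getLast_map hmne)

-- With at least two active records: B's max of the remaining key values is the key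
-- of A's second-to-last sorted record.
theorem second_week {α : Type} (l : List α) (key : α → Int) (d0 : α)
    (h2 : 2 ≤ (PySem.List.sorted l key).length)
    (hsne : PySem.List.sorted l key ≠ []) :
    PySem.List.max? ((l.map key).erase (key ((PySem.List.sorted l key).getLast hsne)))
        (fun x => x)
      = some (key (PySem.List.pyGetD (PySem.List.sorted l key) (-2) d0)) := by
  have hperm : ((PySem.List.sorted l key).map key).Perm (l.map key) :=
    (PySem.List.sorted_perm l key false).map _
  have hpair : ((PySem.List.sorted l key).map key).Pairwise (· ≤ ·) :=
    PySem.List.sorted_map_key_pairwise l key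
  have hmne : (PySem.List.sorted l key).map key ≠ [] := by simpa using hsne
  have hw1 : key ((PySem.List.sorted l key).getLast hsne)
      = ((PySem.List.sorted l key).map key).getLast hmne := (List.getLast_map hmne).symm
  have hlen : ((PySem.List.sorted l key).map key).length
      = (PySem.List.sorted l key).length := by simp
  have hdlen : ((PySem.List.sorted l key).map key).dropLast.length
      = (PySem.List.sorted l key).length - 1 := by simp
  have hdlne : ((PySem.List.sorted l key).map key).dropLast ≠ [] := by
    intro hnil
    have h0 : ((PySem.List.sorted l key).map key).dropLast.length = 0 := by rw [hnil]; rfl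
    rw [hdlen] at h0
    omega
  have hdpair : ((PySem.List.sorted l key).map key).dropLast.Pairwise (· ≤ ·) :=
    hpair.sublist (List.dropLast_sublist _)
  have hdperm : ((PySem.List.sorted l key).map key).dropLast.Perm
      ((l.map key).erase (((PySem.List.sorted l key).map key).getLast hmne)) :=
    ((erase_getLast_perm_dropLast _ hmne).symm).trans (hperm.erase _)
  rw [hw1, max?_eq_getLast_of_perm hdperm hdpair hdlne]
  refine congrArg some ?_
  have e1 : ((PySem.List.sorted l key).map key).dropLast
      = (PySem.List.sorted l key).dropLast.map key := Eq.symm List.map_dropLast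
  rw [PySem.List.pyGetD_neg_ofNat (PySem.List.sorted l key) 2 d0 (by omega) (by omega)]
  have hdne' : (PySem.List.sorted l key).dropLast ≠ [] := by
    intro hnil
    apply hdlne
    rw [e1, hnil]
    rfl
  simp only [e1]
  rw [List.getLast_map (by rw [← e1]; exact hdlne)]
  refine congrArg key ?_
  rw [List.getLast_eq_getElem]
  simp only [List.getElem_dropLast]
  congr 1
  simp only [List.length_dropLast]
  omega

-- Main equality, assembled from the two lemmas above.
theorem calc_gap_eq (week_data : List (List (String × Int))) (target_week : Int) :
    calculate_gap_features week_data target_week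
      = calculate_gap_features_alt week_data target_week := by
  simp only [calculate_gap_features, calculate_gap_features_alt]
  set key : List (String × Int) → Int := fun x => dget x "week" 0 with hkey
  set l := week_data.filter (fun w => decide (dget w "boxoffice" 0 > 0)) with hl
  set s := PySem.List.sorted l key with hs
  set ks := l.map key with hks
  have hlen : ks.length = s.length := by
    rw [hks, hs, List.length_map, PySem.List.length_sorted]
  cases hmx : PySem.List.max? ks (fun x => x) with
  | none =>
    have hksnil : ks = [] := (PySem.List.max?_eq_none_iff ks (fun x => x)).mp hmx
    have hs0 : s.length = 0 := by rw [← hlen, hksnil]; rfl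
    simp [hs0]
  | some w1 =>
    have hksne : ks ≠ [] := by
      intro hnil
      rw [hnil] at hmx
      rw [(PySem.List.max?_eq_none_iff ([] : List Int) (fun x => x)).mpr rfl] at hmx
      cases hmx
    have hsne : s ≠ [] := by
      intro hnil
      have h0 : s.length = 0 := by rw [hnil]; rfl
      have : ks.length = 0 := by omega
      exact hksne (List.length_eq_zero_iff.mp this)
    have h1 : 1 ≤ s.length := by
      have := List.length_pos_of_ne_nil hsne; omega
    have hw1 : key (s.getLast hsne) = w1 := by
      have h := (last_week l key hsne).symm.trans hmx
      exact Option.some_inj.mp h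
    have hlastA : PySem.List.pyGetD s (-1) [] = s.getLast hsne :=
      PySem.List.pyGetD_neg_one s [] hsne
    by_cases h2 : 2 ≤ s.length
    · have h2ks : 2 ≤ ks.length := by omega
      have hw1mem : w1 ∈ ks := PySem.List.max?_mem hmx
      have hrem : PySem.List.remove? ks w1 = some (ks.erase w1) :=
        PySem.List.remove?_eq_some_erase _ _ hw1mem
      have hmax2 : PySem.List.max? (ks.erase w1) (fun x => x)
          = some (key (PySem.List.pyGetD s (-2) [])) := by
        rw [← hw1]
        exact second_week l key [] h2 hsne
      simp only [hrem, hmax2, if_pos h1, if_pos h2, if_pos h2ks, hlastA]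
      simp only [← hw1, hkey]
    · have h2ks : ¬ 2 ≤ ks.length := by omega
      simp only [if_pos h1, if_neg h2, if_neg h2ks, hlastA]
      simp only [← hw1, hkey]

-- ===== VERDICT (by name: the statement is the Claim_ definition above) =====
theorem calculate_gap_features_spec : Claim_equal_calculate_gap_features := by
  intro week_data target_week _
  exact calc_gap_eq week_data target_week
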